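-- pv_equiv track=rewrite | github.com/MR-DJ-223/PythonCodes | FlamesGame.py | Calculate
-- ===== SOURCE A (Python) =====
-- FlamesData = {
--     "F": "Friend", "L": "Lover", "A": "Affectionate",
--     "M": "Marriage", "E": "Enemies", "S": "Siblings"
-- }
--
-- def Calculate(matched: list) -> str:
--     ''' This function will calculate the given list of elements and return the match case '''
--     GameName = list('FLAMES')
--     while len(GameName) != 1:
--         count = len(matched) % len(GameName)
--         index = (count - 1) % len(GameName)
--         GameName.pop(index)
--         GameName = GameName[index:] + GameName[:index]
--     return FlamesData[GameName[0]]
-- ===== SOURCE B (Python) =====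
-- FlamesData = {
--     "F": "Friend", "L": "Lover", "A": "Affectionate",
--     "M": "Marriage", "E": "Enemies", "S": "Siblings"
-- }
--
-- def Calculate(matched: list) -> str:
--     ''' Josephus closed recurrence: no list simulation, just arithmetic over ring sizes 2..6 '''
--     n = len(matched)
--     res = 0
--     for i in range(2, 7):
--         res = (res + n) % i
--     return FlamesData["FLAMES"[res]]
-- ===== Notes on version B (the rewrite author's own statement) =====
-- stated objective: alternative
-- what changed: Replaces the list-popping/rotating FLAMES elimination simulation with the Josephus closed recurrence res = (res + n) % i for i in 2..6, indexing the survivor directly in the string 'FLAMES'.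
import Mathlib
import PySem

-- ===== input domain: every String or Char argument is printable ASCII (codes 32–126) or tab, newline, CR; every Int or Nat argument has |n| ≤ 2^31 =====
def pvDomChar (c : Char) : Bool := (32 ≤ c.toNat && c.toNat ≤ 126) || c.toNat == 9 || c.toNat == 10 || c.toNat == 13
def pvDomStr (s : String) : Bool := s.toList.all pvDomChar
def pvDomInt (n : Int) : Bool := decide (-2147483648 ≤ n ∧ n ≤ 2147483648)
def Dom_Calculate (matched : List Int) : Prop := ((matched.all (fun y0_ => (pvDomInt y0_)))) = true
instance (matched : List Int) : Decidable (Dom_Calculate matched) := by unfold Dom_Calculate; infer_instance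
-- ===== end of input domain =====

-- B replaces A's list-popping elimination simulation by the Josephus closed recurrence
-- res = (res + n) % i for i = 2..6; proved to return the same string on every input.

-- module-level constant FlamesData, shared by both modules
def flamesData : PySem.Dict String String :=
  PySem.Dict.ofList [("F", "Friend"), ("L", "Lover"), ("A", "Affectionate"),
                     ("M", "Marriage"), ("E", "Enemies"), ("S", "Siblings")]

-- ===== PORT A =====
-- the while loop; fuel only makes the recursion structural (the loop runs exactly
-- g.length - 1 times, so fuel = g.length always suffices)
def calcLoop : Nat → Int → List Char → List Char
  | 0, _, g => g
  | fuel + 1, n, g =>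
    if g.length = 1 then g
    else
      let count := PySem.Int.mod n (g.length : Int)
      let index := PySem.Int.mod (count - 1) (g.length : Int)
      match PySem.List.pop? g index with
      | none => []  -- unreachable: index is in range whenever g ≠ [] (and 'FLAMES' never empties)
      | some r =>
        calcLoop fuel n (PySem.List.slice r.2 (some index) none ++ PySem.List.slice r.2 none (some index))

def Calculate (matched : List Int) : String :=
  let gameName := "FLAMES".toList
  let g := calcLoop gameName.length (matched.length : Int) gameName
  match PySem.List.pyGet? g 0 with
  | none => ""  -- unreachable: the loop ends with a singleton (Python would raise IndexError)
  | some c => (flamesData.get? (String.ofList [c])).getD ""  -- KeyError impossible: c ∈ 'FLAMES'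

-- ===== PORT B =====
def Calculate_alt (matched : List Int) : String :=
  let n : Int := (matched.length : Int)
  let res := (PySem.List.pyRange 2 7 1).foldl (fun res i => PySem.Int.mod (res + n) i) 0
  match PySem.Str.pyGet? "FLAMES" res with
  | none => ""  -- unreachable: 0 ≤ res < 6
  | some c => (flamesData.get? (String.ofList [c])).getD ""

-- ===== PRECONDITION & SPEC =====
def Spec_Calculate (matched : List Int) (out : String) : Prop := out = Calculate_alt matched
instance (matched : List Int) (out : String) : Decidable (Spec_Calculate matched out) := by unfold Spec_Calculate; infer_instance

-- ===== CLAIM (what is proved, stated in full; the proofs are below) =====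
def Claim_equal_Calculate : Prop := ∀ (matched : List Int), Dom_Calculate matched → Spec_Calculate matched (Calculate matched)

-- ===== LEMMAS AND PROOFS =====

-- both ports depend on `matched` only through its length
def CalcN (k : Nat) : String :=
  let gameName := "FLAMES".toList
  let g := calcLoop gameName.length (k : Int) gameName
  match PySem.List.pyGet? g 0 with
  | none => ""
  | some c => (flamesData.get? (String.ofList [c])).getD ""

def AltN (k : Nat) : String :=
  let n : Int := (k : Int)
  let res := (PySem.List.pyRange 2 7 1).foldl (fun res i => PySem.Int.mod (res + n) i) 0
  match PySem.Str.pyGet? "FLAMES" res with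
  | none => ""
  | some c => (flamesData.get? (String.ofList [c])).getD ""

lemma calc_eq (m : List Int) : Calculate m = CalcN m.length := rfl
lemma alt_eq (m : List Int) : Calculate_alt m = AltN m.length := rfl

-- A's loop sees n only through n % g.length with g.length ∈ {2,…,6} (all divide 60)
lemma calcLoop_mod (fuel q r : Nat) :
    ∀ g : List Char, g.length ≤ 6 →
      calcLoop fuel ((60 * q + r : Nat) : Int) g = calcLoop fuel ((r : Nat) : Int) g := by
  induction fuel with
  | zero => intro g _; rfl
  | succ fuel ih =>
    intro g hle
    by_cases h0 : g.length = 0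
    · rw [List.length_eq_zero_iff] at h0
      subst h0
      rw [calcLoop, calcLoop]
      simp [PySem.List.pop?]
    rw [calcLoop, calcLoop]
    by_cases h1 : g.length = 1
    · simp [h1]
    · simp only [h1, if_false]
      have hmod : PySem.Int.mod ((60 * q + r : Nat) : Int) (g.length : Int)
          = PySem.Int.mod ((r : Nat) : Int) (g.length : Int) := by
        rw [PySem.Int.mod_natCast, PySem.Int.mod_natCast]
        have h60 : (60 * q + r) % g.length = r % g.length := by
          have : 0 < g.length := by omega
          interval_cases h : g.length <;> omega
        rw [h60]
      rw [hmod]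
      set idx := PySem.Int.mod (PySem.Int.mod ((r : Nat) : Int) (g.length : Int) - 1) (g.length : Int) with hidx
      cases hp : PySem.List.pop? g idx with
      | none => rfl
      | some pr =>
        have hlen := PySem.List.length_of_pop?_eq_some g hp
        have hgpos : 0 < g.length := by omega
        have hnn : (0 : Int) ≤ idx := by
          rw [hidx]; exact PySem.Int.mod_nonneg _ (by exact_mod_cast hgpos)
        refine ih _ ?_
        rw [PySem.List.slice_from _ hnn, PySem.List.slice_to _ hnn]
        simp only [List.length_append, List.length_drop, List.length_take]
        omega

lemma calcN_mod (k : Nat) : CalcN k = CalcN (k % 60) := by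
  simp only [CalcN]
  have h : (k : Int) = ((60 * (k / 60) + k % 60 : Nat) : Int) := by push_cast; omega
  rw [h, calcLoop_mod _ (k / 60) (k % 60) _ (by decide)]

lemma altN_mod (k : Nat) : AltN k = AltN (k % 60) := by
  simp only [AltN]
  have hr : PySem.List.pyRange 2 7 1 = [2, 3, 4, 5, 6] := by decide
  rw [hr]
  have e2 : ∀ a : Int, PySem.Int.mod a 2 = a % 2 := fun a => PySem.Int.mod_eq_emod_of_pos (by norm_num)
  have e3 : ∀ a : Int, PySem.Int.mod a 3 = a % 3 := fun a => PySem.Int.mod_eq_emod_of_pos (by norm_num)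
  have e4 : ∀ a : Int, PySem.Int.mod a 4 = a % 4 := fun a => PySem.Int.mod_eq_emod_of_pos (by norm_num)
  have e5 : ∀ a : Int, PySem.Int.mod a 5 = a % 5 := fun a => PySem.Int.mod_eq_emod_of_pos (by norm_num)
  have e6 : ∀ a : Int, PySem.Int.mod a 6 = a % 6 := fun a => PySem.Int.mod_eq_emod_of_pos (by norm_num)
  simp only [List.foldl, e2, e3, e4, e5, e6]
  have st : ∀ (x m : Int), m = 2 ∨ m = 3 ∨ m = 4 ∨ m = 5 ∨ m = 6 →
      (x + (k : Int)) % m = (x + ((k % 60 : Nat) : Int)) % m := by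
    rintro x m (rfl | rfl | rfl | rfl | rfl) <;> omega
  rw [st 0 2 (by tauto)]
  rw [st ((0 + ((k % 60 : Nat) : Int)) % 2) 3 (by tauto)]
  rw [st (((0 + ((k % 60 : Nat) : Int)) % 2 + ((k % 60 : Nat) : Int)) % 3) 4 (by tauto)]
  rw [st ((((0 + ((k % 60 : Nat) : Int)) % 2 + ((k % 60 : Nat) : Int)) % 3 + ((k % 60 : Nat) : Int)) % 4) 5 (by tauto)]
  rw [st (((((0 + ((k % 60 : Nat) : Int)) % 2 + ((k % 60 : Nat) : Int)) % 3 + ((k % 60 : Nat) : Int)) % 4 + ((k % 60 : Nat) : Int)) % 5) 6 (by tauto)]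

lemma main60 : ∀ r : Nat, r < 60 → CalcN r = AltN r := by decide

-- ===== VERDICT (by name: the statement is the Claim_ definition above) =====
theorem Calculate_spec : Claim_equal_Calculate := by
  intro m _
  unfold Spec_Calculate
  rw [calc_eq, alt_eq, calcN_mod, altN_mod]
  exact main60 _ (Nat.mod_lt _ (by norm_num))
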